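-- pv_equiv track=rewrite | github.com/Djibz/AOC2023 | 12/challenge.py | place_groups
-- ===== SOURCE A (Python) =====
-- def count_group(place, line):
--   group_passed = 0
--   in_group = False
--   count_size = 0
--   for i in range(len(line)):
--     if (line[i] == '#'):
--       in_group = True
--       if group_passed == place:
--         count_size += 1
--
--     if line[i] != '#' and in_group:
--       group_passed += 1
--       in_group = False
--
--   return count_size
--
-- def check_good(line, groups):
--   for k, g in enumerate(groups):
--     if count_group(k, line) != g:
--       return False
--   return True
--
-- def place_groups(line, groups, to_place):
--   new_line = list(line)
--   if to_place == 0: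
--     if check_good(line, groups):
--       return [1]
--     return [0]
--     return str(line).replace('?', '.')
--
--   results = []
--
--   for i in range(len(line)):
--     if new_line[i] == '?':
--       new_line[i] = '#'
--       results += place_groups(''.join(new_line), groups, to_place-1)
--       new_line[i] = '.'
--
--   return results
-- ===== SOURCE B (Python) =====
-- def place_groups(line, groups, to_place):
--     chars = list(line)
--     qpos = [i for i, c in enumerate(chars) if c == '?']
--
--     def good():
--         runs = []
--         cur = 0
--         for c in chars:
--             if c == '#':
--                 cur += 1
--             elif cur:
--                 runs.append(cur)
--                 cur = 0
--         if cur: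
--             runs.append(cur)
--         return all(g == (runs[k] if k < len(runs) else 0)
--                    for k, g in enumerate(groups))
--
--     def rec(start, remaining):
--         if remaining == 0:
--             return [1 if good() else 0]
--         out = []
--         for idx in range(start, len(qpos)):
--             i = qpos[idx]
--             chars[i] = '#'
--             out += rec(idx + 1, remaining - 1)
--             chars[i] = '?'
--         return out
--
--     return rec(0, to_place)
-- ===== Notes on version B (the rewrite author's own statement) =====
-- stated objective: alternative
-- what changed: B precomputes the list of '?' positions once and recurses over that index list with mark/restore (no per-level full-line rescan and no string rebuilding), and checks each leaf by collecting all '#'-run lengths in one pass instead of rescanning the whole line once per group.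
import Mathlib
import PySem

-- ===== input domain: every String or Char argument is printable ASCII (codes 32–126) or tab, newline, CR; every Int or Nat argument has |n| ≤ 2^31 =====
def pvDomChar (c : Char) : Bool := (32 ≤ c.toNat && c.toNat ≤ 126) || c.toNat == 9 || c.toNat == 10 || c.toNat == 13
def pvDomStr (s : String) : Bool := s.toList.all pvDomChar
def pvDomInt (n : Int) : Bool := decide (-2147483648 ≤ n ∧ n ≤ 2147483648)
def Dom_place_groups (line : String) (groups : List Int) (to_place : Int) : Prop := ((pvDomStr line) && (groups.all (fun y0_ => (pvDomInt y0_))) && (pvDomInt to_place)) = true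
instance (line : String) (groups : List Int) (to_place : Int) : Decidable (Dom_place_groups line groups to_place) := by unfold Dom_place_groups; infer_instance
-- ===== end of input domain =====

-- B replaces A's per-level full-line rescan + string rebuilding + per-group recount by one precomputed
-- '?'-position list recursed over with mark/restore and a single-pass run-length check at each leaf (alternative).


-- ===== PORT A =====
-- count_group: one pass over the line with state (group_passed, in_group, count_size)
def pvCgFold (place : Int) : List Char → Int → Bool → Int → Int
  | [], _, _, cnt => cnt
  | c :: rest, gp, ing, cnt =>
    if c = '#' then
      pvCgFold place rest gp true (if gp = place then cnt + 1 else cnt)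
    else if ing then
      pvCgFold place rest (gp + 1) false cnt
    else
      pvCgFold place rest gp ing cnt

def pvCountGroup (place : Int) (l : List Char) : Int := pvCgFold place l 0 false 0

-- check_good: early-return loop over enumerate(groups)
def pvCheckGoodAux (l : List Char) : List (Int × Int) → Bool
  | [] => true
  | (k, g) :: rest => if pvCountGroup k l ≠ g then false else pvCheckGoodAux l rest

def pvCheckGood (l : List Char) (groups : List Int) : Bool :=
  pvCheckGoodAux l (PySem.List.enumerate groups)

-- lemmas cited by the ports' termination proofs
theorem pvCount_set_lt (c : Char) (hc : ¬ c = '?') :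
    ∀ (l : List Char) (i : Nat) (h : i < l.length), l[i] = '?' →
      (l.set i c).count '?' < l.count '?' := by
  intro l
  induction l with
  | nil => intro i h; simp at h
  | cons x t ih =>
    intro i h hq
    cases i with
    | zero =>
      simp only [List.getElem_cons_zero] at hq; subst hq
      simp [hc]
    | succ j =>
      simp only [List.length_cons, Nat.add_lt_add_iff_right] at h
      simp only [List.getElem_cons_succ] at hq
      have := ih j h hq
      simp only [List.set_cons_succ, List.count_cons]
      omega

-- place_groups: leaf check at to_place == 0, else loop over all indices, branching at each '?'
-- (A rebuilds a string for the recursive call and dots out each visited '?' for the rest of its loop)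
mutual
def place_groups (line : String) (groups : List Int) (to_place : Int) : List Int :=
  if to_place = 0 then
    if pvCheckGood line.toList groups then [1] else [0]
  else pvLoopA groups to_place line.toList 0
termination_by (line.toList.count '?', line.toList.length + 1)
decreasing_by
  apply Prod.Lex.right; omega

def pvLoopA (groups : List Int) (t : Int) (l : List Char) (i : Nat) : List Int :=
  if h : i < l.length then
    if hq : l[i] = '?' then
      place_groups (String.ofList (l.set i '#')) groups (t - 1) ++
        pvLoopA groups t (l.set i '.') (i + 1)
    else pvLoopA groups t l (i + 1)
  else []
termination_by (l.count '?', l.length - i)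
decreasing_by
  · simp only [String.toList_ofList]
    apply Prod.Lex.left
    exact pvCount_set_lt '#' (by decide) l i h hq
  · apply Prod.Lex.left
    exact pvCount_set_lt '.' (by decide) l i h hq
  · apply Prod.Lex.right; omega
end

-- ===== PORT B =====
-- one pass collecting the lengths of all '#'-runs
def pvRunsFold : List Char → List Int → Int → List Int
  | [], rs, cur => if cur ≠ 0 then rs ++ [cur] else rs
  | c :: rest, rs, cur =>
    if c = '#' then pvRunsFold rest rs (cur + 1)
    else if cur ≠ 0 then pvRunsFold rest (rs ++ [cur]) 0
    else pvRunsFold rest rs 0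

def pvRuns (l : List Char) : List Int := pvRunsFold l [] 0

-- good(): compare groups positionwise with the run lengths (missing runs count 0)
def pvGood (l : List Char) (groups : List Int) : Bool :=
  let runs := pvRuns l
  (PySem.List.enumerate groups).all
    (fun kg => kg.2 == (if kg.1 < (runs.length : Int) then runs.getD kg.1.toNat 0 else 0))

-- qpos = [i for i, c in enumerate(chars) if c == '?']
def pvQlist : Nat → List Char → List Nat
  | _, [] => []
  | i, c :: rest => if c = '?' then i :: pvQlist (i + 1) rest else pvQlist (i + 1) rest

-- rec(start, remaining): branch over the remaining '?' positions; mark '#' for the branch, restore after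
def pvRecB (groups : List Int) (l : List Char) (qs : List Nat) (r : Int) : List Int :=
  if r = 0 then [if pvGood l groups then 1 else 0]
  else
    match qs with
    | [] => []
    | i :: rest => pvRecB groups (l.set i '#') rest (r - 1) ++ pvRecB groups l rest r
termination_by qs.length
decreasing_by all_goals simp

def place_groups_alt (line : String) (groups : List Int) (to_place : Int) : List Int :=
  pvRecB groups line.toList (pvQlist 0 line.toList) to_place

-- ===== PRECONDITION & SPEC =====
def Spec_place_groups (line : String) (groups : List Int) (to_place : Int) (out : List Int) : Prop := out = place_groups_alt line groups to_place
instance (line : String) (groups : List Int) (to_place : Int) (out : List Int) : Decidable (Spec_place_groups line groups to_place out) := by unfold Spec_place_groups; infer_instance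

-- ===== CLAIM (what is proved, stated in full; the proofs are below) =====
def Claim_equal_place_groups : Prop := ∀ (line : String) (groups : List Int) (to_place : Int), Dom_place_groups line groups to_place → Spec_place_groups line groups to_place (place_groups line groups to_place)

-- ===== LEMMAS AND PROOFS =====

-- the '#'-mask of a line: the leaf check and every branch decision below depend only on it
def pvMask (l : List Char) : List Bool := l.map (· == '#')

theorem pvRunsFold_mask (l l' : List Char) (h : pvMask l = pvMask l') :
    ∀ rs cur, pvRunsFold l rs cur = pvRunsFold l' rs cur := by
  induction l generalizing l' with
  | nil => cases l' <;> simp_all [pvMask]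
  | cons c t ih =>
    cases l' with
    | nil => simp [pvMask] at h
    | cons c' t' =>
      simp [pvMask] at h
      intro rs cur
      by_cases hc : c = '#' <;> by_cases hc' : c' = '#'
      · simp [pvRunsFold, hc, hc', ih t' h.2]
      · exfalso; simp [hc, hc'] at h
      · exfalso; simp [hc, hc'] at h
      · simp [pvRunsFold, hc, hc', ih t' h.2]

theorem pvGood_mask (l l' : List Char) (groups : List Int) (h : pvMask l = pvMask l') :
    pvGood l groups = pvGood l' groups := by
  simp [pvGood, pvRuns, pvRunsFold_mask l l' h]

-- characterisation of count_group's fold against the run-collecting fold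
-- pvLk place rs cur: what count_size is when the completed runs are rs and the current open run has length cur
def pvLk (place : Int) (rs : List Int) (cur : Int) : Int :=
  if 0 ≤ place then
    (if place < (rs.length : Int) then rs.getD place.toNat 0
     else if place = (rs.length : Int) then cur else 0)
  else 0

theorem pvLk_nil (place : Int) : pvLk place [] 0 = 0 := by
  unfold pvLk; split_ifs <;> simp_all

theorem pvLk_hash (place : Int) (rs : List Int) (cur : Int) :
    (if (rs.length : Int) = place then pvLk place rs cur + 1 else pvLk place rs cur) =
      pvLk place rs (cur + 1) := by
  unfold pvLk; split_ifs <;> omega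

theorem pvLk_append (place : Int) (rs : List Int) (cur : Int) :
    pvLk place rs cur = pvLk place (rs ++ [cur]) 0 := by
  unfold pvLk
  have hlen : ((rs ++ [cur]).length : Int) = (rs.length : Int) + 1 := by simp
  by_cases h0 : 0 ≤ place
  · by_cases h1 : place < (rs.length : Int)
    · have hn : place.toNat < rs.length := by omega
      have h1' : place < ((rs ++ [cur]).length : Int) := by omega
      rw [if_pos h0, if_pos h0, if_pos h1, if_pos h1', List.getD_append rs [cur] 0 place.toNat hn]
    · by_cases h2 : place = (rs.length : Int)
      · have hn : place.toNat = rs.length := by omega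
        have h1' : place < ((rs ++ [cur]).length : Int) := by omega
        rw [if_pos h0, if_pos h0, if_neg h1, if_pos h2, if_pos h1', hn]
        simp
      · have h1' : ¬ place < ((rs ++ [cur]).length : Int) := by omega
        rw [if_pos h0, if_pos h0, if_neg h1, if_neg h2, if_neg h1']
        split_ifs <;> rfl
  · rw [if_neg h0, if_neg h0]

theorem pvCg_aux (place : Int) (l : List Char) :
    ∀ (rs : List Int) (cur : Int), 0 ≤ cur →
      pvCgFold place l (rs.length : Int) (decide ¬ cur = 0) (pvLk place rs cur) =
        pvLk place (pvRunsFold l rs cur) 0 := by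
  induction l with
  | nil =>
    intro rs cur hc
    by_cases h : cur = 0
    · subst h; simp [pvCgFold, pvRunsFold]
    · simp [pvCgFold, pvRunsFold, h, pvLk_append place rs cur]
  | cons c rest ih =>
    intro rs cur hc
    by_cases hch : c = '#'
    · have h1 : (decide ¬ (cur + 1) = 0) = true := by simp; omega
      simp only [pvCgFold, pvRunsFold, hch, ite_true]
      rw [pvLk_hash place rs cur]
      have := ih rs (cur + 1) (by omega)
      rw [h1] at this
      exact this
    · by_cases h : cur = 0
      · subst h
        simp only [pvCgFold, pvRunsFold, hch, decide_not]
        simpa using ih rs 0 (le_refl 0)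
      · have hd : (decide ¬ cur = 0) = true := by simp [h]
        simp only [pvCgFold, pvRunsFold, hch, hd, ite_true, ite_false]
        rw [pvLk_append place rs cur]
        have hlen : (((rs ++ [cur]).length : Int)) = (rs.length : Int) + 1 := by simp
        have := ih (rs ++ [cur]) 0 (le_refl 0)
        rw [hlen] at this
        simpa [h] using this

theorem pvCountGroup_runs (k : Int) (l : List Char) :
    pvCountGroup k l = pvLk k (pvRuns l) 0 := by
  have := pvCg_aux k l [] 0 (le_refl 0)
  simpa [pvCountGroup, pvRuns, pvLk_nil] using this

theorem pvLk_eq_bexpr (k : Int) (rs : List Int) (hk : 0 ≤ k) :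
    pvLk k rs 0 = (if k < (rs.length : Int) then rs.getD k.toNat 0 else 0) := by
  unfold pvLk
  by_cases h1 : k < (rs.length : Int)
  · simp [hk, h1]
  · by_cases h2 : k = (rs.length : Int) <;> simp [hk, h1, h2]

theorem pvCheckGoodAux_enum (l : List Char) :
    ∀ (gs : List Int) (s : Int), 0 ≤ s →
      pvCheckGoodAux l (PySem.List.enumerate gs s) =
        (PySem.List.enumerate gs s).all
          (fun kg => kg.2 == (if kg.1 < ((pvRuns l).length : Int)
                              then (pvRuns l).getD kg.1.toNat 0 else 0)) := by
  intro gs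
  induction gs with
  | nil => intro s _; simp [PySem.List.enumerate_nil, pvCheckGoodAux]
  | cons g rest ih =>
    intro s hs
    rw [PySem.List.enumerate_cons]
    simp only [pvCheckGoodAux, List.all_cons]
    rw [pvCountGroup_runs, pvLk_eq_bexpr s (pvRuns l) hs]
    by_cases hg : (if s < ((pvRuns l).length : Int) then (pvRuns l).getD s.toNat 0 else 0) = g
    · rw [if_neg (not_not_intro hg)]
      rw [beq_iff_eq.mpr hg.symm, Bool.true_and]
      exact ih (s + 1) (by omega)
    · rw [if_pos hg]
      rw [beq_eq_false_iff_ne.mpr (Ne.symm hg), Bool.false_and]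

theorem pvCheckGood_eq_good (l : List Char) (groups : List Int) :
    pvCheckGood l groups = pvGood l groups := by
  unfold pvCheckGood pvGood
  exact pvCheckGoodAux_enum l groups 0 (le_refl 0)

-- '?'-positions of l from index i on (pvQlist i of the dropped prefix)
def pvQF (l : List Char) (i : Nat) : List Nat := pvQlist i (l.drop i)

-- no '?' strictly below index i (A's loop has dotted those positions out)
def pvNoQ (l : List Char) (i : Nat) : Prop := ∀ j (_ : j < l.length), j < i → l[j] ≠ '?'

theorem pvQF_stop (l : List Char) (i : Nat) (h : l.length ≤ i) : pvQF l i = [] := by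
  simp [pvQF, List.drop_eq_nil_of_le h, pvQlist]

theorem pvQF_step (l : List Char) (i : Nat) (h : i < l.length) :
    pvQF l i = if l[i] = '?' then i :: pvQF l (i + 1) else pvQF l (i + 1) := by
  unfold pvQF
  rw [List.drop_eq_getElem_cons h]
  simp [pvQlist]

theorem pvQF_zero (l : List Char) : pvQlist 0 l = pvQF l 0 := by simp [pvQF]

theorem pvQF_set (l : List Char) (i j : Nat) (a : Char) (h : j < i) :
    pvQF (l.set j a) i = pvQF l i := by
  unfold pvQF
  rw [List.drop_set_of_lt h]

theorem pvQF_of_noQ (l : List Char) : ∀ i, pvNoQ l i → pvQF l 0 = pvQF l i := by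
  intro i
  induction i with
  | zero => intro _; rfl
  | succ m ih =>
    intro h
    have h' : pvNoQ l m := fun j hj hlt => h j hj (by omega)
    rw [ih h']
    by_cases hm : m < l.length
    · rw [pvQF_step l m hm, if_neg (h m hm (by omega))]
    · rw [pvQF_stop l m (by omega), pvQF_stop l (m + 1) (by omega)]

theorem pvMask_set (l l' : List Char) (i : Nat) (c c' : Char) (h : pvMask l = pvMask l')
    (hcc : (c == '#') = (c' == '#')) : pvMask (l.set i c) = pvMask (l'.set i c') := by
  simp [pvMask, List.map_set]
  rw [← pvMask, ← pvMask, h, hcc]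

theorem pvMask_set_dot (l : List Char) (i : Nat) (h : i < l.length) (hq : l[i] = '?') :
    pvMask (l.set i '.') = pvMask l := by
  unfold pvMask
  rw [List.map_set]
  apply List.ext_getElem (by simp)
  intro j h1 h2
  by_cases hij : j = i
  · subst hij
    simp only [List.length_set, List.length_map] at h1
    rw [List.getElem_set_self]
    simp [List.getElem_map, hq]
  · rw [List.getElem_set_ne (by omega)]

-- A's index loop from i versus B's recursion over the remaining '?' positions
theorem pvMain_loop (n : Nat)
    (IH : ∀ (line : String) (l' : List Char) (groups : List Int) (t : Int),
        line.toList.count '?' < n → pvMask line.toList = pvMask l' →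
        place_groups line groups t = pvRecB groups l' (pvQlist 0 line.toList) t) :
    ∀ (d i : Nat) (l l' : List Char) (groups : List Int) (t : Int),
      l.length - i ≤ d → l.count '?' ≤ n → pvMask l = pvMask l' → pvNoQ l i → ¬ t = 0 →
      pvLoopA groups t l i = pvRecB groups l' (pvQF l i) t := by
  intro d
  induction d with
  | zero =>
    intro i l l' groups t hd hn hm hq ht
    rw [pvLoopA, dif_neg (by omega), pvQF_stop l i (by omega), pvRecB.eq_def, if_neg ht]
  | succ d ihd =>
    intro i l l' groups t hd hn hm hq ht
    by_cases hi : i < l.length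
    · by_cases hqi : l[i] = '?'
      · -- branch: recurse with '#', then continue on the dotted line
        have hlt : (l.set i '#').count '?' < n :=
          lt_of_lt_of_le (pvCount_set_lt '#' (by decide) l i hi hqi) hn
        have hm1 : pvMask (String.ofList (l.set i '#')).toList = pvMask (l'.set i '#') := by
          rw [String.toList_ofList]
          exact pvMask_set l l' i '#' '#' hm rfl
        have hnq1 : pvNoQ (l.set i '#') (i + 1) := by
          intro j hj hlt'
          by_cases hij : j = i
          · subst hij
            rw [List.getElem_set_self (by simpa using hi)]
            decide
          · rw [List.getElem_set_ne (by omega)]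
            exact hq j (by simpa using hj) (by omega)
        have hql : pvQlist 0 (String.ofList (l.set i '#')).toList = pvQF l (i + 1) := by
          rw [String.toList_ofList, pvQF_zero, pvQF_of_noQ _ (i + 1) hnq1,
            pvQF_set l (i + 1) i '#' (by omega)]
        have e1 := IH (String.ofList (l.set i '#')) (l'.set i '#') groups (t - 1)
          (by rw [String.toList_ofList]; exact hlt) hm1
        rw [hql] at e1
        have hnq2 : pvNoQ (l.set i '.') (i + 1) := by
          intro j hj hlt'
          by_cases hij : j = i
          · subst hij
            rw [List.getElem_set_self (by simpa using hi)]
            decide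
          · rw [List.getElem_set_ne (by omega)]
            exact hq j (by simpa using hj) (by omega)
        have e2 := ihd (i + 1) (l.set i '.') l' groups t (by simp; omega)
          (le_trans (le_of_lt (pvCount_set_lt '.' (by decide) l i hi hqi)) hn)
          ((pvMask_set_dot l i hi hqi).trans hm) hnq2 ht
        rw [pvQF_set l (i + 1) i '.' (by omega)] at e2
        rw [pvLoopA, dif_pos hi, dif_pos hqi, pvQF_step l i hi, if_pos hqi,
          pvRecB.eq_def, if_neg ht]
        rw [e1, e2]
      · -- skip: not a '?'
        have hnq : pvNoQ l (i + 1) := by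
          intro j hj hlt'
          by_cases hij : j = i
          · subst hij; exact hqi
          · exact hq j hj (by omega)
        rw [pvLoopA, dif_pos hi, dif_neg hqi, pvQF_step l i hi, if_neg hqi]
        exact ihd (i + 1) l l' groups t (by omega) hn hm hnq ht
    · rw [pvLoopA, dif_neg hi, pvQF_stop l i (by omega), pvRecB.eq_def, if_neg ht]

theorem pvMain : ∀ (n : Nat) (line : String) (l' : List Char) (groups : List Int) (t : Int),
    line.toList.count '?' ≤ n → pvMask line.toList = pvMask l' →
    place_groups line groups t = pvRecB groups l' (pvQlist 0 line.toList) t := by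
  intro n
  induction n using Nat.strong_induction_on with
  | _ n IHn =>
    intro line l' groups t hn hm
    by_cases ht : t = 0
    · subst ht
      rw [place_groups, if_pos rfl, pvRecB.eq_def, if_pos rfl,
        pvCheckGood_eq_good, pvGood_mask line.toList l' groups hm]
      by_cases hg : pvGood l' groups <;> simp [hg]
    · rw [place_groups, if_neg ht, pvQF_zero]
      refine pvMain_loop n ?_ line.toList.length 0 line.toList l' groups t (by omega) hn hm
        (fun j _ h0 => absurd h0 (Nat.not_lt_zero j)) ht
      intro line2 l2' groups2 t2 hlt hm2
      exact IHn (line2.toList.count '?') (by omega) line2 l2' groups2 t2 (le_refl _) hm2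

-- ===== VERDICT (by name: the statement is the Claim_ definition above) =====
theorem place_groups_spec : Claim_equal_place_groups := by
  intro line groups t _
  unfold Spec_place_groups place_groups_alt
  exact pvMain (line.toList.count '?') line line.toList groups t (le_refl _) rfl
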